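-- pv_equiv track=rewrite | github.com/momaherg/NPT | scripts/analyze_npt_checkpoint.py | detect_modulation_type
-- ===== SOURCE A (Python) =====
-- from typing import Dict, Set, Optional
--
-- def detect_modulation_type(npt_weights: Dict) -> str:
--     """Detect the type of modulation (single/dual/triple)."""
--     has_gate = any('W_down_gate' in k or 'W_a_up_gate' in k for k in npt_weights.keys())
--     has_down = any('W_down_down' in k or 'W_a_up_down' in k for k in npt_weights.keys())
--
--     if has_down:
--         return "triple"
--     elif has_gate:
--         return "dual"
--     else:
--         return "single"
-- ===== SOURCE B (Python) =====
-- def detect_modulation_type(npt_weights):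
--     """Detect the type of modulation (single/dual/triple)."""
--     def rank(k):
--         if 'W_down_down' in k or 'W_a_up_down' in k:
--             return 2
--         if 'W_down_gate' in k or 'W_a_up_gate' in k:
--             return 1
--         return 0
--     level = max((rank(k) for k in npt_weights.keys()), default=0)
--     return ("single", "dual", "triple")[level]
-- ===== Notes on version B (the rewrite author's own statement) =====
-- stated objective: alternative
-- what changed: B maps each key to a numeric rank (down-substring 2, gate-substring 1, else 0), takes the maximum rank with max(..., default=0), and indexes a name tuple with it, replacing A's two boolean any() scans and if/elif chain.
import Mathlib
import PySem

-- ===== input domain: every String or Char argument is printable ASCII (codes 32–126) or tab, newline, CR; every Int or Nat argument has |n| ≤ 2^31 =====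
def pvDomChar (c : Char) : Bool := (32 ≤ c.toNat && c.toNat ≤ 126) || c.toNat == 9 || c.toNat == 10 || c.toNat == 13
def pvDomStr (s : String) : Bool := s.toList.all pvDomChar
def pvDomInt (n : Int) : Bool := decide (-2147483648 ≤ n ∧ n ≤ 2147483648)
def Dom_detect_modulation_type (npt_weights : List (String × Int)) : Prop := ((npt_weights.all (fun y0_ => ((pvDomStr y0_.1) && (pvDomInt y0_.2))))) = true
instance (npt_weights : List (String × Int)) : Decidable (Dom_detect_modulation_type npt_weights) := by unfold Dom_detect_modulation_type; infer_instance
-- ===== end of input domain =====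

-- B classifies each key into a numeric rank (down→2, gate→1, else 0), reduces the
-- ranks with max and indexes a name table, replacing A's two any() scans + if/elif chain.


-- ===== PORT A =====
def gateKey (k : String) : Bool :=
  PySem.Str.isIn "W_down_gate" k || PySem.Str.isIn "W_a_up_gate" k

def downKey (k : String) : Bool :=
  PySem.Str.isIn "W_down_down" k || PySem.Str.isIn "W_a_up_down" k

def detect_modulation_type (npt_weights : List (String × Int)) : String :=
  let has_gate := (npt_weights.map Prod.fst).any gateKey
  let has_down := (npt_weights.map Prod.fst).any downKey
  if has_down then "triple"
  else if has_gate then "dual"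
  else "single"

-- ===== PORT B =====
-- per-key rank: down-substring → 2, gate-substring → 1, else 0
def dmtRank (k : String) : Nat :=
  if PySem.Str.isIn "W_down_down" k || PySem.Str.isIn "W_a_up_down" k then 2
  else if PySem.Str.isIn "W_down_gate" k || PySem.Str.isIn "W_a_up_gate" k then 1
  else 0

def detect_modulation_type_alt (npt_weights : List (String × Int)) : String :=
  -- max(generator, default=0) over the ranks of the keys
  let level := (npt_weights.map Prod.fst).foldl (fun acc k => max acc (dmtRank k)) 0
  ["single", "dual", "triple"].getD level "single"

-- ===== PRECONDITION & SPEC =====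
def Spec_detect_modulation_type (npt_weights : List (String × Int)) (out : String) : Prop := out = detect_modulation_type_alt npt_weights
instance (npt_weights : List (String × Int)) (out : String) : Decidable (Spec_detect_modulation_type npt_weights out) := by unfold Spec_detect_modulation_type; infer_instance

-- ===== CLAIM (what is proved, stated in full; the proofs are below) =====
def Claim_equal_detect_modulation_type : Prop := ∀ (npt_weights : List (String × Int)), Dom_detect_modulation_type npt_weights → Spec_detect_modulation_type npt_weights (detect_modulation_type npt_weights)

-- ===== LEMMAS AND PROOFS =====
theorem dmt_foldl_max (ks : List String) (a : Nat) :
    ks.foldl (fun acc k => max acc (dmtRank k)) a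
      = max a (ks.foldl (fun acc k => max acc (dmtRank k)) 0) := by
  induction ks generalizing a with
  | nil => simp
  | cons k rest ih =>
    simp only [List.foldl_cons]
    rw [ih (max a (dmtRank k)), ih (max 0 (dmtRank k))]
    omega

theorem dmtRank_eq (k : String) :
    dmtRank k = if downKey k then 2 else if gateKey k then 1 else 0 := rfl

theorem dmt_level_eq (ks : List String) :
    ks.foldl (fun acc k => max acc (dmtRank k)) 0
      = if ks.any downKey then 2 else if ks.any gateKey then 1 else 0 := by
  induction ks with
  | nil => simp
  | cons k rest ih =>
    simp only [List.foldl_cons, List.any_cons]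
    rw [dmt_foldl_max, ih, dmtRank_eq]
    by_cases hd : downKey k = true <;> by_cases hg : gateKey k = true <;>
      by_cases hrd : rest.any downKey = true <;> by_cases hrg : rest.any gateKey = true <;>
        simp [hd, hg, hrd, hrg]

-- ===== VERDICT (by name: the statement is the Claim_ definition above) =====
theorem detect_modulation_type_spec : Claim_equal_detect_modulation_type := by
  intro npt_weights _
  unfold Spec_detect_modulation_type detect_modulation_type detect_modulation_type_alt
  rw [dmt_level_eq]
  by_cases hd : ((npt_weights.map Prod.fst).any downKey) = true <;>
    by_cases hg : ((npt_weights.map Prod.fst).any gateKey) = true <;>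
      simp [hd, hg]
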